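-- pv_equiv track=rewrite | github.com/MrBrantCode/unitest_baseline | mut_generate/mist_train_cf/cf_61878/solution.py | fibonacci_square_sum
-- ===== SOURCE A (Python) =====
-- import bisect
--
-- def fibonacci_square_sum(n):
--     fibonacci = [0, 1]
--     squares = [0, 1]
--     total = 1
--     for _ in range(2, n):
--         next_fibonacci = fibonacci[-1] + fibonacci[-2]
--         fibonacci.append(next_fibonacci)
--         square = next_fibonacci ** 2
--         total += square
--         bisect.insort(squares, square)
--     return squares, total
-- ===== SOURCE B (Python) =====
-- def fibonacci_square_sum(n):
--     fibs = [0, 1]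
--     for _ in range(max(n, 2) - 2):
--         fibs.append(fibs[-1] + fibs[-2])
--     squares = [f * f for f in fibs]
--     # sum of F(i)^2 over the list equals F(last) * (F(last) + F(second-last))
--     total = fibs[-1] * (fibs[-1] + fibs[-2])
--     return squares, total
-- ===== Notes on version B (the rewrite author's own statement) =====
-- stated objective: alternative
-- what changed: B drops both the insort call and the running total: it builds only the Fibonacci list, maps squaring over it once, and computes the sum by the closed-form identity sum F(i)^2 = F(k)*F(k+1) from the last two Fibonacci numbers.
import Mathlib
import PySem

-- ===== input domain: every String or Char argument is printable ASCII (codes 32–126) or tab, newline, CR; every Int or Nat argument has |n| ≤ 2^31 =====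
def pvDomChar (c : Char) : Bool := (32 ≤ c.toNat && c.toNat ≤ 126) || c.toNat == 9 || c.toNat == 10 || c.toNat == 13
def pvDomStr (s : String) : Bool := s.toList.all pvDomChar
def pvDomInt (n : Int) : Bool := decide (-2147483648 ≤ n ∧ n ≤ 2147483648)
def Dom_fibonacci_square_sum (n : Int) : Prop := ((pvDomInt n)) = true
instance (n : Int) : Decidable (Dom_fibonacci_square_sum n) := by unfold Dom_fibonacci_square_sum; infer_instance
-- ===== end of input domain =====

-- B replaces A's in-loop insort and running total by a single map of squares and the
-- closed-form identity sum F(i)^2 = F(k)*F(k+1); objective: alternative (same asymptotics not claimed).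

-- ===== PORT A =====
-- bisect.insort on a list of Int (insert after equal elements), ported by hand (exact)
def pvInsort (xs : List Int) (x : Int) : List Int :=
  match xs with
  | [] => [x]
  | y :: ys => if x < y then x :: y :: ys else y :: pvInsort ys x

-- the 'for _ in range(2, n)' loop; fibonacci[-1]/[-2] always exist (length ≥ 2), so pyGetD is exact
def pvLoopA : List Int → List Int × List Int × Int → List Int × List Int × Int
  | [], st => st
  | _ :: rest, (fib, squares, total) =>
    let next := PySem.List.pyGetD fib (-1) 0 + PySem.List.pyGetD fib (-2) 0
    let square := next ^ 2
    pvLoopA rest (fib ++ [next], pvInsort squares square, total + square)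

def fibonacci_square_sum (n : Int) : List Int × Int :=
  let st := pvLoopA (PySem.List.pyRange 2 n 1) ([0, 1], [0, 1], 1)
  (st.2.1, st.2.2)

-- ===== PORT B =====
-- the 'for _ in range(max(n,2) - 2)' loop of Source B: only the Fibonacci list is maintained
def pvLoopB : List Int → List Int → List Int
  | [], fibs => fibs
  | _ :: rest, fibs =>
    pvLoopB rest (fibs ++ [PySem.List.pyGetD fibs (-1) 0 + PySem.List.pyGetD fibs (-2) 0])

def fibonacci_square_sum_alt (n : Int) : List Int × Int :=
  let fibs := pvLoopB (PySem.List.pyRange 0 (max n 2 - 2) 1) [0, 1]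
  let squares := fibs.map (fun f => f * f)
  let total := PySem.List.pyGetD fibs (-1) 0 *
    (PySem.List.pyGetD fibs (-1) 0 + PySem.List.pyGetD fibs (-2) 0)
  (squares, total)

-- ===== PRECONDITION & SPEC =====
def Spec_fibonacci_square_sum (n : Int) (out : List Int × Int) : Prop := out = fibonacci_square_sum_alt n
instance (n : Int) (out : List Int × Int) : Decidable (Spec_fibonacci_square_sum n out) := by unfold Spec_fibonacci_square_sum; infer_instance

-- ===== CLAIM (what is proved, stated in full; the proofs are below) =====
def Claim_equal_fibonacci_square_sum : Prop := ∀ (n : Int), Dom_fibonacci_square_sum n → Spec_fibonacci_square_sum n (fibonacci_square_sum n)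

-- ===== LEMMAS AND PROOFS =====

theorem pvGetLast2 (init : List Int) (a b : Int) :
    PySem.List.pyGetD (init ++ [a, b]) (-1) 0 = b ∧
    PySem.List.pyGetD (init ++ [a, b]) (-2) 0 = a := by
  constructor
  · have : init ++ [a, b] = (init ++ [a]) ++ [b] := by simp
    rw [this, PySem.List.pyGetD_neg_one_append_singleton]
  · rw [PySem.List.pyGetD_neg_ofNat (init ++ [a, b]) 2 0 (by omega) (by simp)]
    simp

theorem pvInsort_append (xs : List Int) (x : Int) (h : ∀ y ∈ xs, ¬ x < y) :
    pvInsort xs x = xs ++ [x] := by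
  induction xs with
  | nil => simp [pvInsort]
  | cons y ys ih =>
    have hy := h y (by simp)
    simp only [pvInsort, if_neg hy, List.cons_append, List.cons.injEq, true_and]
    exact ih (fun z hz => h z (by simp [hz]))

theorem pvLoop_eq : ∀ (l1 l2 : List Int), l1.length = l2.length →
    ∀ (init : List Int) (a b : Int), 0 ≤ a → a ≤ b →
    (∀ x ∈ init ++ [a, b], 0 ≤ x ∧ x ≤ b) →
    ∃ (init' : List Int) (a' b' : Int),
      pvLoopB l2 (init ++ [a, b]) = init' ++ [a', b'] ∧
      pvLoopA l1 (init ++ [a, b], (init ++ [a, b]).map (fun f => f * f), b * (a + b)) =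
        (init' ++ [a', b'], (init' ++ [a', b']).map (fun f => f * f), b' * (a' + b')) := by
  intro l1
  induction l1 with
  | nil =>
    intro l2 hlen init a b _ _ _
    have : l2 = [] := List.eq_nil_of_length_eq_zero (by simpa using hlen.symm)
    subst this
    exact ⟨init, a, b, rfl, rfl⟩
  | cons h1 r1 ih =>
    intro l2 hlen init a b ha hab hall
    cases l2 with
    | nil => simp at hlen
    | cons h2 r2 =>
      have hlen' : r1.length = r2.length := by simpa using hlen
      obtain ⟨hg1, hg2⟩ := pvGetLast2 init a b
      -- the new state after one iteration, shared by both loops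
      have hlist : (init ++ [a, b]) ++ [b + a] = (init ++ [a]) ++ [b, b + a] := by simp
      have hall' : ∀ x ∈ (init ++ [a]) ++ [b, b + a], 0 ≤ x ∧ x ≤ b + a := by
        intro x hx
        rw [← hlist] at hx
        rcases List.mem_append.1 hx with hx | hx
        · obtain ⟨h0, hb⟩ := hall x hx; exact ⟨h0, by omega⟩
        · simp at hx; omega
      obtain ⟨init', a', b', hB, hA⟩ :=
        ih r2 hlen' (init ++ [a]) b (b + a) (by omega) (by omega) hall'
      refine ⟨init', a', b', ?_, ?_⟩
      · simpa [pvLoopB, hg1, hg2, hlist] using hB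
      · -- unfold one step of pvLoopA
        have hsq : pvInsort ((init ++ [a, b]).map (fun f => f * f)) ((b + a) ^ 2) =
            (init ++ [a, b]).map (fun f => f * f) ++ [(b + a) ^ 2] := by
          apply pvInsort_append
          intro y hy
          obtain ⟨x, hx, rfl⟩ := List.mem_map.1 hy
          obtain ⟨h0, hb⟩ := hall x hx
          nlinarith
        have hmaps : (init ++ [a, b]).map (fun f => f * f) ++ [(b + a) ^ 2] =
            ((init ++ [a]) ++ [b, b + a]).map (fun f => f * f) := by
          rw [← hlist]; simp; ring
        have htot : b * (a + b) + (b + a) ^ 2 = (b + a) * (b + (b + a)) := by ring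
        simp only [pvLoopA, hg1, hg2, hsq, hmaps, htot, hlist]
        exact hA

-- ===== VERDICT (by name: the statement is the Claim_ definition above) =====
theorem fibonacci_square_sum_spec : Claim_equal_fibonacci_square_sum := by
  intro n _
  unfold Spec_fibonacci_square_sum fibonacci_square_sum fibonacci_square_sum_alt
  have hlen : (PySem.List.pyRange 2 n 1).length = (PySem.List.pyRange 0 (max n 2 - 2) 1).length := by
    simp [PySem.List.length_pyRange_one]; omega
  obtain ⟨init', a', b', hB, hA⟩ := pvLoop_eq (PySem.List.pyRange 2 n 1)
    (PySem.List.pyRange 0 (max n 2 - 2) 1) hlen [] 0 1 (by omega) (by omega)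
    (by intro x hx; simp at hx; omega)
  obtain ⟨hg1, hg2⟩ := pvGetLast2 init' a' b'
  have h01 : ([] : List Int) ++ [(0 : Int), 1] = [0, 1] := rfl
  rw [h01] at hB hA
  have hmap : ([0, 1] : List Int).map (fun f => f * f) = [0, 1] := by decide
  have htot : (1 : Int) * (0 + 1) = 1 := by decide
  rw [hmap, htot] at hA
  simp only [hA, hB, hg1, hg2]
  ring_nf
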